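-- pv_equiv track=rewrite | github.com/meetgorasia/meetgorasia-github.io | app/testing.py | generate_range
-- ===== SOURCE A (Python) =====
-- def generate_range(balls):
--     ranges = {}
--     b = 0
--     for color in balls:
--         a = b + 1
--         b = balls[color][0] + a - 1
--         r = (a,b)
--         ranges[color] = r
--     return ranges
-- ===== SOURCE B (Python) =====
-- def generate_range(balls):
--     counts = [balls[c][0] for c in balls]
--     ends = []
--     t = 0
--     for n in counts:
--         t += n
--         ends.append(t)
--     return {c: (e - n + 1, e) for c, n, e in zip(balls, counts, ends)}
-- ===== Notes on version B (the rewrite author's own statement) =====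
-- stated objective: alternative
-- what changed: B replaces A's single loop that threads a running endpoint accumulator through dict assignments by a two-phase decomposition: it first materialises the counts and a prefix-sum table of endpoints, then builds every range (end-count+1, end) independently by zipping the three lists.
import Mathlib
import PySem

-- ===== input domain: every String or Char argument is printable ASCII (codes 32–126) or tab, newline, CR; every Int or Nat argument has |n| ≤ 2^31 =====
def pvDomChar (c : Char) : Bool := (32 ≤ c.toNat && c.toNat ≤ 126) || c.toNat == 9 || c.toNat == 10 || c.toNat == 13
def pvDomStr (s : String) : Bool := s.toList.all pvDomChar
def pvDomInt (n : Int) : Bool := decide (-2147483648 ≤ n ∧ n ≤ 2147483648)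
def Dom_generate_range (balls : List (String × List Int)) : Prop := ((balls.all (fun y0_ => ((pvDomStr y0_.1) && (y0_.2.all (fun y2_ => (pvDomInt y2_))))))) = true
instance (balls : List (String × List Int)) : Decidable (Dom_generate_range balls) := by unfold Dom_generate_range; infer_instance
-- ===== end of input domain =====

-- Equivalence is about the RETURN value; neither program mutates its argument.
-- B is an alternative decomposition (prefix-sum table + zip) of the same O(n) task.

-- ===== PORT A =====
-- A iterates the dict's keys threading a running endpoint b; ranges[color] = (b+1, count + b).
-- '.getD 0' only totalises the lookup/indexing; Pre_ excludes the inputs where Python raises.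
def generate_range (balls : List (String × List Int)) : List (String × Int × Int) :=
  let d := PySem.Dict.ofList balls
  (d.keys.foldl
    (fun (st : PySem.Dict String (Int × Int) × Int) color =>
      let a := st.2 + 1
      let b := ((d.get? color).bind (fun l => PySem.List.pyGet? l 0)).getD 0 + a - 1
      (st.1.insert color (a, b), b))
    (PySem.Dict.empty, 0)).1.items

-- ===== PORT B =====
-- B: counts list, prefix-sum endpoints list, then zip the three lists into ranges.
def generate_range_alt (balls : List (String × List Int)) : List (String × Int × Int) :=
  let d := PySem.Dict.ofList balls
  let counts := d.keys.map (fun c => ((d.get? c).bind (fun l => PySem.List.pyGet? l 0)).getD 0)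
  let ends := (counts.foldl (fun (st : List Int × Int) n => (st.1 ++ [st.2 + n], st.2 + n)) ([], (0:Int))).1
  (d.keys.zip (counts.zip ends)).map (fun p => (p.1, p.2.2 - p.2.1 + 1, p.2.2))

-- ===== PRECONDITION & SPEC =====
-- Pre_ excludes exactly the inputs where Python A raises IndexError: some color whose ball list is empty.
def Pre_generate_range (balls : List (String × List Int)) : Prop :=
  (balls.all (fun p => !p.2.isEmpty)) = true
instance (balls : List (String × List Int)) : Decidable (Pre_generate_range balls) := by unfold Pre_generate_range; infer_instance
def pvWitness_generate_range : (List (String × List Int)) := [("red", [2]), ("blue", [3, 7])]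

def Spec_generate_range (balls : List (String × List Int)) (out : List (String × Int × Int)) : Prop := out = generate_range_alt balls
instance (balls : List (String × List Int)) (out : List (String × Int × Int)) : Decidable (Spec_generate_range balls out) := by unfold Spec_generate_range; infer_instance

-- ===== CLAIM (what is proved, stated in full; the proofs are below) =====
def Claim_equal_generate_range : Prop := ∀ (balls : List (String × List Int)), Dom_generate_range balls → Pre_generate_range balls → Spec_generate_range balls (generate_range balls)

-- ===== LEMMAS AND PROOFS =====

-- the common per-color count, shared characterisation of both ports
def grCount (d : PySem.Dict String (List Int)) (c : String) : Int :=
  ((d.get? c).bind (fun l => PySem.List.pyGet? l 0)).getD 0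

-- the intended result, built recursively from a starting offset
def grBuild (d : PySem.Dict String (List Int)) (t : Int) : List String → List (String × Int × Int)
  | [] => []
  | c :: cs => (c, t + 1, t + grCount d c) :: grBuild d (t + grCount d c) cs

theorem grA_items (d : PySem.Dict String (List Int)) (cs : List String)
    (acc : PySem.Dict String (Int × Int)) (t : Int)
    (hfresh : ∀ c ∈ cs, acc.contains c = false) (hnd : cs.Nodup) :
    (cs.foldl
      (fun (st : PySem.Dict String (Int × Int) × Int) color =>
        let a := st.2 + 1
        let b := grCount d color + a - 1
        (st.1.insert color (a, b), b))
      (acc, t)).1.items = acc.items ++ grBuild d t cs := by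
  induction cs generalizing acc t with
  | nil => simp [grBuild]
  | cons c cs ih =>
    simp only [List.foldl_cons, grBuild]
    have hc : acc.contains c = false := hfresh c (List.mem_cons_self ..)
    rw [ih _ _ (fun c' hc' => by
        rw [PySem.Dict.contains_insert]
        have hne : c' ≠ c := by
          rintro rfl; exact (List.nodup_cons.mp hnd).1 hc'
        simp [hne, hfresh c' (List.mem_cons_of_mem _ hc')])
      (List.nodup_cons.mp hnd).2]
    rw [PySem.Dict.items_insert_of_not_contains _ _ hc]
    simp only [List.append_assoc, List.singleton_append]
    ring_nf

theorem grScan (ns : List Int) (out : List Int) (t : Int) :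
    (ns.foldl (fun (st : List Int × Int) n => (st.1 ++ [st.2 + n], st.2 + n)) (out, t)).1
      = out ++ ns.foldr (fun n k t => (t + n) :: k (t + n)) (fun _ => []) t := by
  induction ns generalizing out t with
  | nil => simp
  | cons n ns ih => simp [ih]

theorem grB_build (d : PySem.Dict String (List Int)) (cs : List String) (t : Int) :
    (cs.zip ((cs.map (grCount d)).zip
        ((cs.map (grCount d)).foldr (fun n k t => (t + n) :: k (t + n)) (fun _ => []) t))).map
      (fun p => (p.1, p.2.2 - p.2.1 + 1, p.2.2)) = grBuild d t cs := by
  induction cs generalizing t with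
  | nil => simp [grBuild]
  | cons c cs ih =>
    simp only [List.map_cons, List.foldr_cons, List.zip_cons_cons, grBuild]
    rw [ih, show ∀ g : Int, t + g - g + 1 = t + 1 from fun g => by ring]

-- ===== VERDICT (by name: the statement is the Claim_ definition above) =====
theorem generate_range_spec : Claim_equal_generate_range := by
  intro balls _ _
  show generate_range balls = generate_range_alt balls
  unfold generate_range generate_range_alt
  dsimp only
  have hg : (fun c => (((PySem.Dict.ofList balls).get? c).bind fun l => PySem.List.pyGet? l 0).getD 0)
      = grCount (PySem.Dict.ofList balls) := rfl
  rw [grScan, List.nil_append, hg, grB_build]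
  have := grA_items (PySem.Dict.ofList balls) (PySem.Dict.ofList balls).keys
    PySem.Dict.empty 0 (fun c _ => PySem.Dict.contains_empty c)
    (PySem.Dict.nodup_keys_ofList balls)
  simpa [grCount] using this
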